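-- pv_equiv track=rewrite | github.com/LiebeII/Travushki-Muravushki | analysis/layout_evaluator.py | _get_finger_for_scancode_temp
-- ===== SOURCE A (Python) =====
-- def _get_finger_for_scancode_temp(scancode: str) -> str:
--     """Вспомогательная функция для определения пальца по сканкоду"""
--     # Временная реализация - можно вынести в отдельный класс
--     key_finger = {
--         'left_pinky': ['02', '10', '1E', '2C', '38'],
--         'left_ring': ['03', '11', '1F', '2D'],
--         'left_middle': ['04', '12', '20', '2E'],
--         'left_index': ['05', '13', '21', '2F', '06', '14', '22', '30'],
--         'right_index': ['07', '15', '23', '31', '08', '16', '24', '32'],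
--         'right_middle': ['09', '17', '25', '33'],
--         'right_ring': ['0A', '18', '26', '34'],
--         'right_pinky': ['0B', '19', '27', '35', '0C', '1A', '28', '36', '29', '0D', '1B', '37'],
--     }
--
--     for finger, scancodes in key_finger.items():
--         if scancode in scancodes:
--             return finger
--     return None
-- ===== SOURCE B (Python) =====
-- _HEX = "0123456789ABCDEF"
-- # finger by keyboard column 0..11 (same on every one of the 4 rows)
-- _COLUMN_FINGER = ['left_pinky', 'left_ring', 'left_middle', 'left_index', 'left_index',
--                   'right_index', 'right_index', 'right_middle', 'right_ring',
--                   'right_pinky', 'right_pinky', 'right_pinky']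
--
--
-- def _get_finger_for_scancode_temp(scancode: str) -> str:
--     """Геометрия клавиатуры: сканкод -> (ряд, колонка) -> палец по колонке."""
--     if len(scancode) != 2 or scancode[0] not in _HEX or scancode[1] not in _HEX:
--         return None
--     n = _HEX.index(scancode[0]) * 16 + _HEX.index(scancode[1])
--     if n == 0x38:  # левый Alt стоит вне четырёх основных рядов
--         return 'left_pinky'
--     row, col = divmod(n - 2, 14)  # ряды начинаются с 0x02, 0x10, 0x1E, 0x2C (шаг 14)
--     if 0 <= row < 4 and col < 12:
--         return _COLUMN_FINGER[col]
--     return None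
-- ===== Notes on version B (the rewrite author's own statement) =====
-- stated objective: alternative
-- what changed: Replaced the scan over the finger->scancodes table by keyboard geometry: the scancode is parsed as a two-digit hex number, row and column are computed with divmod(n-2,14) (rows start at 0x02,0x10,0x1E,0x2C), and the column index selects the finger; no list of scancodes is consulted.
import Mathlib
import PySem

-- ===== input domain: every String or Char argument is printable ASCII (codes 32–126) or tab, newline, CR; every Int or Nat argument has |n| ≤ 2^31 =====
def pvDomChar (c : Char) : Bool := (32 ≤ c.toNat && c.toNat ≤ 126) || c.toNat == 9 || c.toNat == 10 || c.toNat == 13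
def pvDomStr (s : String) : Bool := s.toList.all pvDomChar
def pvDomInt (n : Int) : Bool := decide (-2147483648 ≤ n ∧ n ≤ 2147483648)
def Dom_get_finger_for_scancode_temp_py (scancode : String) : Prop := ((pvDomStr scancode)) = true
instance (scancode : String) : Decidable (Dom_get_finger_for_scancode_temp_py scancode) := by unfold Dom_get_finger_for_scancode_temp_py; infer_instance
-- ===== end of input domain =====

-- B replaces A's table scan (loop over the finger->scancodes dict with a membership test per
-- finger) by keyboard geometry: parse the scancode as two hex digits, compute row/column by
-- arithmetic and map the column to its finger (alternative decomposition, no table of scancodes).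

-- ===== PORT A =====
-- A's local dict key_finger, as an insertion-ordered association list
def pvKeyFingerA : List (String × List String) :=
  [("left_pinky", ["02", "10", "1E", "2C", "38"]),
   ("left_ring", ["03", "11", "1F", "2D"]),
   ("left_middle", ["04", "12", "20", "2E"]),
   ("left_index", ["05", "13", "21", "2F", "06", "14", "22", "30"]),
   ("right_index", ["07", "15", "23", "31", "08", "16", "24", "32"]),
   ("right_middle", ["09", "17", "25", "33"]),
   ("right_ring", ["0A", "18", "26", "34"]),
   ("right_pinky", ["0B", "19", "27", "35", "0C", "1A", "28", "36", "29", "0D", "1B", "37"])]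

-- 'for finger, scancodes in key_finger.items(): if scancode in scancodes: return finger' / 'return None'
def pvLoopA (scancode : String) : List (String × List String) → Option String
  | [] => none
  | (finger, scancodes) :: rest =>
      if scancodes.contains scancode then some finger else pvLoopA scancode rest

def get_finger_for_scancode_temp_py (scancode : String) : Option String :=
  pvLoopA scancode pvKeyFingerA

-- ===== PORT B =====
-- _HEX = "0123456789ABCDEF", as its list of characters ('c in _HEX' = list membership for one char)
def pvHex : List Char := ['0', '1', '2', '3', '4', '5', '6', '7', '8', '9', 'A', 'B', 'C', 'D', 'E', 'F']

-- _COLUMN_FINGER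
def pvColumnFinger : List String :=
  ["left_pinky", "left_ring", "left_middle", "left_index", "left_index",
   "right_index", "right_index", "right_middle", "right_ring",
   "right_pinky", "right_pinky", "right_pinky"]

-- Source B: guard 'len(scancode) != 2 or scancode[0] not in _HEX or scancode[1] not in _HEX'
-- (the match on the two characters is that length test), n from the two hex digits
-- (_HEX.index under the contains guard is always found, so getD 0 is exact), the 0x38
-- special case, then row, col = divmod(n - 2, 14) and the column table.
def get_finger_for_scancode_temp_py_alt (scancode : String) : Option String :=
  match scancode.toList with
  | [c1, c0] =>
      if pvHex.contains c1 && pvHex.contains c0 then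
        let n : Int := (((PySem.List.index? pvHex c1).getD 0 : Nat) : Int) * 16
                        + (((PySem.List.index? pvHex c0).getD 0 : Nat) : Int)
        if n = 56 then some "left_pinky"
        else
          let row := PySem.Int.floordiv (n - 2) 14
          let col := PySem.Int.mod (n - 2) 14
          if 0 ≤ row ∧ row < 4 ∧ col < 12 then
            PySem.List.pyGet? pvColumnFinger col  -- _COLUMN_FINGER[col]; in range under the guard
          else none
      else none
  | _ => none

-- ===== PRECONDITION & SPEC =====
def Spec_get_finger_for_scancode_temp_py (scancode : String) (out : Option String) : Prop := out = get_finger_for_scancode_temp_py_alt scancode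
instance (scancode : String) (out : Option String) : Decidable (Spec_get_finger_for_scancode_temp_py scancode out) := by unfold Spec_get_finger_for_scancode_temp_py; infer_instance

-- ===== CLAIM (what is proved, stated in full; the proofs are below) =====
def Claim_equal_get_finger_for_scancode_temp_py : Prop := ∀ (scancode : String), Dom_get_finger_for_scancode_temp_py scancode → Spec_get_finger_for_scancode_temp_py scancode (get_finger_for_scancode_temp_py scancode)

-- ===== LEMMAS AND PROOFS =====

-- the guard both programs share: exactly two characters, both uppercase hex digits
def pvShape (s : String) : Bool :=
  match s.toList with
  | [a, b] => pvHex.contains a && pvHex.contains b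
  | _ => false

-- B returns none whenever the guard fails (B's own first branch)
theorem pv_altB_none (s : String) (h : pvShape s = false) :
    get_finger_for_scancode_temp_py_alt s = none := by
  unfold pvShape at h
  unfold get_finger_for_scancode_temp_py_alt
  rcases hl : s.toList with _ | ⟨a, _ | ⟨b, _ | ⟨c, t⟩⟩⟩ <;> rw [hl] at h <;> simp_all

-- every scancode in A's table satisfies the guard
theorem pv_table_shape : ∀ p ∈ pvKeyFingerA, ∀ t ∈ p.2, pvShape t = true := by decide

-- A's loop returns none when the guard fails (s can match no table entry)
theorem pv_loopA_none (s : String) (kf : List (String × List String))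
    (hall : ∀ p ∈ kf, ∀ t ∈ p.2, pvShape t = true) (h : pvShape s = false) :
    pvLoopA s kf = none := by
  induction kf with
  | nil => rfl
  | cons p rest ih =>
      obtain ⟨f, cs⟩ := p
      have hc : cs.contains s = false := by
        by_contra hcc
        have hmem : s ∈ cs := List.contains_iff_mem.mp (by simpa using hcc)
        have := hall (f, cs) (List.mem_cons_self ..) s hmem
        simp [this] at h
      simp only [pvLoopA, hc, Bool.false_eq_true, if_false]
      exact ih (fun q hq => hall q (List.mem_cons_of_mem _ hq))

-- the finite heart: on every two-hex-digit string the two programs agree (256 cases)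
theorem pv_all_cases :
    (pvHex.all fun a => pvHex.all fun b =>
      get_finger_for_scancode_temp_py (String.ofList [a, b])
        == get_finger_for_scancode_temp_py_alt (String.ofList [a, b])) = true := by decide

-- ===== VERDICT (by name: the statement is the Claim_ definition above) =====
theorem get_finger_for_scancode_temp_py_spec : Claim_equal_get_finger_for_scancode_temp_py := by
  intro s _
  unfold Spec_get_finger_for_scancode_temp_py
  by_cases hs : pvShape s = true
  · unfold pvShape at hs
    rcases hl : s.toList with _ | ⟨a, _ | ⟨b, _ | ⟨c, t⟩⟩⟩ <;> rw [hl] at hs <;> try simp at hs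
    obtain ⟨ha, hb⟩ := by simpa using hs
    have hsmk : s = String.ofList [a, b] := by
      apply String.toList_inj.mp
      rw [hl]; simp
    rw [hsmk]
    have h1 := (List.all_eq_true.mp pv_all_cases) a ha
    have h2 := (List.all_eq_true.mp h1) b hb
    exact eq_of_beq h2
  · rw [Bool.not_eq_true] at hs
    unfold get_finger_for_scancode_temp_py
    rw [pv_loopA_none s pvKeyFingerA pv_table_shape hs, pv_altB_none s hs]
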